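-- pv_equiv track=rewrite | github.com/0015427/MyTest | Tool/AbandonedClass.py | _get_ordered_tables
-- ===== SOURCE A (Python) =====
-- from typing import List, Tuple, Any, Optional
--
-- def _get_ordered_tables(schema_config: dict) -> List[str]:
--     """获取按依赖关系排序的表名列表"""
--     dependencies = {}
--
--     for table_name, table_info in schema_config.items():
--         dependencies[table_name] = []
--         if 'foreign_keys' in table_info:
--             for fk in table_info['foreign_keys']:
--                 dependencies[table_name].append(fk['references_table'])
--
--     # 拓扑排序
--     visited = set()
--     order = []
--
--     def dfs(table_name):
--         if table_name in visited:
--             return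
--         visited.add(table_name)
--
--         for dep in dependencies.get(table_name, []):
--             dfs(dep)
--
--         order.append(table_name)
--
--     for table_name in dependencies:
--         dfs(table_name)
--
--     return order
-- ===== SOURCE B (Python) =====
-- from typing import List
--
-- def _get_ordered_tables(schema_config: dict) -> List[str]:
--     """Iterative (explicit-stack) DFS producing the same dependency post-order."""
--     dependencies = {
--         table_name: [fk['references_table'] for fk in table_info.get('foreign_keys', [])]
--         for table_name, table_info in schema_config.items()
--     }
--
--     visited = set()
--     order = []
--     for start in dependencies:
--         stack = [(start, False)]
--         while stack:
--             node, done = stack.pop()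
--             if done:
--                 order.append(node)
--             elif node not in visited:
--                 visited.add(node)
--                 stack.append((node, True))
--                 for dep in reversed(dependencies.get(node, [])):
--                     stack.append((dep, False))
--     return order
-- ===== Notes on version B (the rewrite author's own statement) =====
-- stated objective: alternative
-- what changed: The recursive dfs with a mutable closure is replaced by an iterative DFS over an explicit stack of (node, done) frames (post-order markers), and the dependency dict is built by a comprehension instead of insert-then-append loops.
-- outside the precondition, e.g. on _get_ordered_tables({'a': {'foreign_keys': [{}]}}): A raises KeyError, B raises KeyError
import Mathlib
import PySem

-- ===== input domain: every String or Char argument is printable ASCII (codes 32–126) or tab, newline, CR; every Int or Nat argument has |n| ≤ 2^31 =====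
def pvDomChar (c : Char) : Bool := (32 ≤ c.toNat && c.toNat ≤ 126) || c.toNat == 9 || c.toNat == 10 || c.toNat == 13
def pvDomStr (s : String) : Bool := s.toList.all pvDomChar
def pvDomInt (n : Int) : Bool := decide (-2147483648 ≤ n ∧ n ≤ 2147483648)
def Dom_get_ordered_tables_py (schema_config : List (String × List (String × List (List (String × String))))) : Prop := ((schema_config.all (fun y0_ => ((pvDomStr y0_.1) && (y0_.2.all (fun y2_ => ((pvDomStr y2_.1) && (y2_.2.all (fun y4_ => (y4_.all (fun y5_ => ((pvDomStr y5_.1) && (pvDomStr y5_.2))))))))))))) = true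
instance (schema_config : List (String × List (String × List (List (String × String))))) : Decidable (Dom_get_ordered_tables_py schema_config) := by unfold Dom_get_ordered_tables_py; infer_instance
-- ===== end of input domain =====

-- B replaces A's recursive dfs closure by an iterative DFS over an explicit stack of
-- (node, done) frames yielding the same post-order (objective: alternative decomposition).

-- ===== PORT A =====
-- A's recursive dfs; the fuel argument only makes the recursion structural for Lean,
-- get_ordered_tables_py passes enough fuel that it is never exhausted
def pvDfsA (deps : PySem.Dict String (List String)) :
    Nat → PySem.Set String × List String → String → PySem.Set String × List String
  | 0, vo, _ => vo
  | f + 1, vo, n =>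
    if PySem.Set.contains vo.1 n then vo
    else
      let vo1 : PySem.Set String × List String := (PySem.Set.add vo.1 n, vo.2)
      let r := (deps.getD n []).foldl (fun p d => pvDfsA deps f p d) vo1
      (r.1, r.2 ++ [n])

def get_ordered_tables_py (schema_config : List (String × List (String × List (List (String × String))))) : List String :=
  let schema := PySem.Dict.ofList schema_config
  let dependencies := schema.items.foldl (fun dep ti =>
      let dep' := dep.insert ti.1 ([] : List String)
      let info := PySem.Dict.ofList ti.2
      if info.contains "foreign_keys" then
        (info.getD "foreign_keys" []).foldl
          (fun dep fk => dep.modify ti.1 []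
            (fun l => l ++ [(PySem.Dict.ofList fk).getD "references_table" ""])) dep'
      else dep') PySem.Dict.empty
  let nodes := dependencies.keys ++ dependencies.values.flatten
  (dependencies.keys.foldl (fun vo t => pvDfsA dependencies (nodes.length + 1) vo t)
    ((PySem.Set.empty : PySem.Set String), ([] : List String))).2

-- ===== PORT B =====
-- B's inner while-loop over the explicit stack (list head = top of stack); the fuel
-- argument only makes the loop structural, get_ordered_tables_py_alt passes enough
def pvRunB (deps : PySem.Dict String (List String)) :
    Nat → PySem.Set String × List String → List (String × Bool) → PySem.Set String × List String
  | _, vo, [] => vo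
  | 0, vo, _ => vo
  | g + 1, vo, (n, true) :: S => pvRunB deps g (vo.1, vo.2 ++ [n]) S
  | g + 1, vo, (n, false) :: S =>
    if PySem.Set.contains vo.1 n then pvRunB deps g vo S
    else pvRunB deps g (PySem.Set.add vo.1 n, vo.2)
      ((deps.getD n []).reverse.foldl (fun st d => (d, false) :: st) ((n, true) :: S))

def get_ordered_tables_py_alt (schema_config : List (String × List (String × List (List (String × String))))) : List String :=
  let dependencies := (PySem.Dict.ofList schema_config).items.foldl (fun dep ti =>
      dep.insert ti.1 (((PySem.Dict.ofList ti.2).getD "foreign_keys" []).map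
        (fun fk => (PySem.Dict.ofList fk).getD "references_table" ""))) PySem.Dict.empty
  let nodes := dependencies.keys ++ dependencies.values.flatten
  let fuel := 1 + nodes.length * (2 + (dependencies.values.map List.length).sum)
  (dependencies.keys.foldl (fun vo t => pvRunB dependencies fuel vo [(t, false)])
    ((PySem.Set.empty : PySem.Set String), ([] : List String))).2

-- ===== PRECONDITION & SPEC =====
-- Pre_ excludes exactly the inputs on which A raises KeyError: some dict in a table's
-- 'foreign_keys' list has no 'references_table' key.
def Pre_get_ordered_tables_py (schema_config : List (String × List (String × List (List (String × String))))) : Prop :=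
  ∀ ti ∈ (PySem.Dict.ofList schema_config).items,
    ∀ fk ∈ (PySem.Dict.ofList ti.2).getD "foreign_keys" [],
      (PySem.Dict.ofList fk).contains "references_table" = true
instance (schema_config : List (String × List (String × List (List (String × String))))) : Decidable (Pre_get_ordered_tables_py schema_config) := by unfold Pre_get_ordered_tables_py; infer_instance

def pvWitness_get_ordered_tables_py : (List (String × List (String × List (List (String × String))))) :=
  [("users", []), ("orders", [("foreign_keys", [[("references_table", "users")]])])]

def Spec_get_ordered_tables_py (schema_config : List (String × List (String × List (List (String × String))))) (out : List String) : Prop := out = get_ordered_tables_py_alt schema_config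
instance (schema_config : List (String × List (String × List (List (String × String))))) (out : List String) : Decidable (Spec_get_ordered_tables_py schema_config out) := by unfold Spec_get_ordered_tables_py; infer_instance

-- ===== CLAIM (what is proved, stated in full; the proofs are below) =====
def Claim_equal_get_ordered_tables_py : Prop := ∀ (schema_config : List (String × List (String × List (List (String × String))))), Dom_get_ordered_tables_py schema_config → Pre_get_ordered_tables_py schema_config → Spec_get_ordered_tables_py schema_config (get_ordered_tables_py schema_config)

-- ===== LEMMAS AND PROOFS =====

-- generic: a foldl invariant
lemma pv_foldl_inv {α σ : Type} (g : σ → α → σ) (P : σ → Prop) :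
    ∀ (l : List α) (s : σ), P s → (∀ s a, a ∈ l → P s → P (g s a)) → P (l.foldl g s) := by
  intro l
  induction l with
  | nil => intro s hs _; exact hs
  | cons a l ih =>
    intro s hs hstep
    rw [List.foldl_cons]
    exact ih (g s a) (hstep s a ((by simp)) hs)
      (fun s b hb h => hstep s b (List.mem_cons_of_mem _ hb) h)

-- generic: two foldls agree while an invariant is maintained
lemma pv_foldl_inv₂ {α σ : Type} (g₁ g₂ : σ → α → σ) (P : σ → Prop) :
    ∀ (l : List α) (s : σ), P s →
      (∀ s a, a ∈ l → P s → g₁ s a = g₂ s a ∧ P (g₁ s a)) →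
      l.foldl g₁ s = l.foldl g₂ s ∧ P (l.foldl g₁ s) := by
  intro l
  induction l with
  | nil => intro s hs _; exact ⟨rfl, hs⟩
  | cons a l ih =>
    intro s hs hstep
    obtain ⟨he, hp⟩ := hstep s a ((by simp)) hs
    obtain ⟨he', hp'⟩ := ih (g₁ s a) hp
      (fun s b hb h => hstep s b (List.mem_cons_of_mem _ hb) h)
    exact ⟨by rw [List.foldl_cons, List.foldl_cons, ← he, he'], by rw [List.foldl_cons]; exact hp'⟩

-- all nodes the DFS can ever touch
def pvUniv (deps : PySem.Dict String (List String)) : List String :=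
  deps.keys ++ deps.values.flatten

-- number of universe nodes not yet visited
def pvK (deps : PySem.Dict String (List String)) (V : PySem.Set String) : Nat :=
  ((pvUniv deps).toFinset \ V.toFinset).card

-- structural specification of B's stack machine: every pending node is advanced by the
-- recursive dfs with canonical fuel
def pvSem (deps : PySem.Dict String (List String)) :
    PySem.Set String × List String → List (String × Bool) → PySem.Set String × List String
  | vo, [] => vo
  | vo, (n, true) :: S => pvSem deps (vo.1, vo.2 ++ [n]) S
  | vo, (n, false) :: S => pvSem deps (pvDfsA deps (pvK deps vo.1 + 1) vo n) S

lemma pv_mem_getD_univ (deps : PySem.Dict String (List String)) (n d : String)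
    (h : d ∈ deps.getD n []) : d ∈ pvUniv deps := by
  rw [PySem.Dict.getD_eq_get?_getD] at h
  cases hopt : deps.get? n with
  | none => rw [hopt] at h; simp at h
  | some v =>
    rw [hopt] at h
    simp only [Option.getD_some] at h
    have hi := PySem.Dict.mem_items_of_get?_eq_some deps hopt
    unfold pvUniv
    refine List.mem_append_right _ (List.mem_flatten.mpr ⟨v, ?_, h⟩)
    simp only [PySem.Dict.values]
    exact List.mem_map.mpr ⟨(n, v), hi, rfl⟩

lemma pv_getD_len_le (deps : PySem.Dict String (List String)) (n : String) :
    (deps.getD n []).length ≤ (deps.values.map List.length).sum := by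
  rw [PySem.Dict.getD_eq_get?_getD]
  cases hopt : deps.get? n with
  | none => simp
  | some v =>
    simp only [Option.getD_some]
    have hi := PySem.Dict.mem_items_of_get?_eq_some deps hopt
    have hv : v ∈ deps.values := by
      simp only [PySem.Dict.values]
      exact List.mem_map.mpr ⟨(n, v), hi, rfl⟩
    exact List.single_le_sum (fun x _ => Nat.zero_le x) _ (List.mem_map.mpr ⟨v, hv, rfl⟩)

lemma pvDfsA_mono (deps : PySem.Dict String (List String)) :
    ∀ (f : Nat) (vo : PySem.Set String × List String) (n x : String),
      x ∈ vo.1 → x ∈ (pvDfsA deps f vo n).1 := by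
  intro f
  induction f with
  | zero => intro vo n x hx; simpa [pvDfsA] using hx
  | succ f ih =>
    intro vo n x hx
    by_cases hc : PySem.Set.contains vo.1 n = true
    · simp only [pvDfsA]
      rw [if_pos hc]
      exact hx
    · simp only [pvDfsA]
      rw [if_neg hc]
      exact pv_foldl_inv (fun p d => pvDfsA deps f p d) (fun p => x ∈ p.1) (deps.getD n [])
        (PySem.Set.add vo.1 n, vo.2) ((PySem.Set.mem_add _ _ _).mpr (Or.inl hx))
        (fun s a _ hs => ih s a x hs)

lemma pvK_add_lt (deps : PySem.Dict String (List String)) (V : PySem.Set String) (n : String)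
    (hn : n ∈ pvUniv deps) (hv : n ∉ V) : pvK deps (PySem.Set.add V n) < pvK deps V := by
  unfold pvK
  rw [PySem.Set.add_of_not_mem hv, List.toFinset_append]
  have h2 : V.toFinset ∪ [n].toFinset = insert n V.toFinset := by
    ext x; simp
  rw [h2, Finset.sdiff_insert]
  have hmem : n ∈ (pvUniv deps).toFinset \ V.toFinset :=
    Finset.mem_sdiff.mpr ⟨List.mem_toFinset.mpr hn, fun hmm => hv (List.mem_toFinset.mp hmm)⟩
  rw [Finset.card_erase_of_mem hmem]
  have hpos := Finset.card_pos.mpr ⟨n, hmem⟩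
  omega

lemma pvK_mono (deps : PySem.Dict String (List String)) (V V' : PySem.Set String)
    (h : ∀ x ∈ V, x ∈ V') : pvK deps V' ≤ pvK deps V := by
  unfold pvK
  exact Finset.card_le_card (Finset.sdiff_subset_sdiff (Finset.Subset.refl _)
    (fun x hx => List.mem_toFinset.mpr (h x (List.mem_toFinset.mp hx))))

lemma pvK_le_len (deps : PySem.Dict String (List String)) (V : PySem.Set String) :
    pvK deps V ≤ (pvUniv deps).length := by
  unfold pvK
  exact le_trans (Finset.card_le_card Finset.sdiff_subset) (List.toFinset_card_le _)

lemma pvDfsA_irrel (deps : PySem.Dict String (List String)) :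
    ∀ (f f' : Nat) (vo : PySem.Set String × List String) (n : String),
      n ∈ pvUniv deps → pvK deps vo.1 < f → pvK deps vo.1 < f' →
      pvDfsA deps f vo n = pvDfsA deps f' vo n := by
  intro f
  induction f with
  | zero => intro f' vo n _ hf _; exact absurd hf (Nat.not_lt_zero _)
  | succ f ih =>
    intro f' vo n hn hf hf'
    match f' with
    | 0 => exact absurd hf' (Nat.not_lt_zero _)
    | f2 + 1 =>
      by_cases hc : PySem.Set.contains vo.1 n = true
      · simp only [pvDfsA]
        rw [if_pos hc, if_pos hc]
      · have hnV : n ∉ vo.1 := fun hm => hc ((PySem.Set.contains_iff _ _).mpr hm)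
        have hklt := pvK_add_lt deps vo.1 n hn hnV
        have hfold := pv_foldl_inv₂ (fun p d => pvDfsA deps f p d) (fun p d => pvDfsA deps f2 p d)
          (fun p => ∀ x ∈ PySem.Set.add vo.1 n, x ∈ p.1) (deps.getD n [])
          (PySem.Set.add vo.1 n, vo.2) (fun x hx => hx)
          (fun s a ha hs => by
            have hks : pvK deps s.1 ≤ pvK deps (PySem.Set.add vo.1 n) := pvK_mono deps _ _ hs
            exact ⟨ih f2 s a (pv_mem_getD_univ deps n a ha) (by omega) (by omega),
              fun x hx => pvDfsA_mono deps f s a x (hs x hx)⟩)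
        simp only [pvDfsA]
        rw [if_neg hc, if_neg hc, hfold.1]

lemma pvSem_append (deps : PySem.Dict String (List String)) :
    ∀ (S1 S2 : List (String × Bool)) (vo : PySem.Set String × List String),
      pvSem deps vo (S1 ++ S2) = pvSem deps (pvSem deps vo S1) S2 := by
  intro S1
  induction S1 with
  | nil => intro S2 vo; simp [pvSem]
  | cons p S1 ih =>
    intro S2 vo
    obtain ⟨n, b⟩ := p
    cases b <;> simp [pvSem, ih]

lemma pvSem_falses (deps : PySem.Dict String (List String)) :
    ∀ (l : List String), (∀ d ∈ l, d ∈ pvUniv deps) →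
      ∀ (vo : PySem.Set String × List String) (f : Nat), pvK deps vo.1 < f →
      pvSem deps vo (l.map (fun d => (d, false))) = l.foldl (fun p d => pvDfsA deps f p d) vo := by
  intro l
  induction l with
  | nil => intro _ vo f _; simp [pvSem]
  | cons d rest ih =>
    intro hl vo f hf
    have hd : d ∈ pvUniv deps := hl d ((by simp))
    simp only [List.map_cons, pvSem, List.foldl_cons]
    rw [pvDfsA_irrel deps (pvK deps vo.1 + 1) f vo d hd (Nat.lt_succ_self _) hf]
    refine ih (fun x hx => hl x (List.mem_cons_of_mem _ hx)) _ f ?_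
    exact lt_of_le_of_lt
      (pvK_mono deps vo.1 (pvDfsA deps f vo d).1 (fun x hx => pvDfsA_mono deps f vo d x hx)) hf

-- pushing the reversed children onto the stack is prepending them in order
lemma pv_rev_push (l : List String) (acc : List (String × Bool)) :
    l.reverse.foldl (fun st d => (d, false) :: st) acc = l.map (fun d => (d, false)) ++ acc := by
  rw [List.foldl_reverse]
  induction l with
  | nil => rfl
  | cons a l ih => simp [List.foldr_cons, ih]

lemma pvRunB_eq_sem (deps : PySem.Dict String (List String)) :
    ∀ (g : Nat) (vo : PySem.Set String × List String) (S : List (String × Bool)),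
      (∀ p ∈ S, p.2 = false → p.1 ∈ pvUniv deps) →
      S.length + pvK deps vo.1 * (2 + (deps.values.map List.length).sum) ≤ g →
      pvRunB deps g vo S = pvSem deps vo S := by
  intro g
  induction g with
  | zero =>
    intro vo S hinv hb
    match S with
    | [] => simp [pvRunB, pvSem]
    | p :: S =>
      rw [List.length_cons] at hb
      have h1 : S.length + 1 ≤ 0 := le_trans (Nat.le_add_right _ _) hb
      exact absurd h1 (by omega)
  | succ g ih =>
    intro vo S hinv hb
    match S with
    | [] => simp [pvRunB, pvSem]
    | (n, true) :: S =>
      simp only [pvRunB, pvSem]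
      refine ih (vo.1, vo.2 ++ [n]) S (fun p hp hpf => hinv p (List.mem_cons_of_mem _ hp) hpf) ?_
      have hkeq : pvK deps (vo.1, vo.2 ++ [n]).1 = pvK deps vo.1 := rfl
      rw [List.length_cons] at hb
      rw [hkeq]
      omega
    | (n, false) :: S =>
      by_cases hc : PySem.Set.contains vo.1 n = true
      · have h1 : pvDfsA deps (pvK deps vo.1 + 1) vo n = vo := by
          simp only [pvDfsA]
          rw [if_pos hc]
        simp only [pvRunB, pvSem]
        rw [if_pos hc, h1]
        refine ih vo S (fun p hp hpf => hinv p (List.mem_cons_of_mem _ hp) hpf) ?_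
        rw [List.length_cons] at hb
        omega
      · have hn : n ∈ pvUniv deps := hinv (n, false) ((by simp)) rfl
        have hnV : n ∉ vo.1 := fun hm => hc ((PySem.Set.contains_iff _ _).mpr hm)
        have hklt := pvK_add_lt deps vo.1 n hn hnV
        have hcE : (deps.getD n []).length ≤ (deps.values.map List.length).sum :=
          pv_getD_len_le deps n
        have hmul : (pvK deps (PySem.Set.add vo.1 n) + 1) * (2 + (deps.values.map List.length).sum)
            ≤ pvK deps vo.1 * (2 + (deps.values.map List.length).sum) :=
          Nat.mul_le_mul_right _ (Nat.succ_le_of_lt hklt)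
        rw [Nat.succ_mul] at hmul
        simp only [pvRunB, pvSem]
        rw [if_neg hc, pv_rev_push]
        have hinv' : ∀ p ∈ (deps.getD n []).map (fun d => (d, false)) ++ (n, true) :: S,
            p.2 = false → p.1 ∈ pvUniv deps := by
          intro p hp hpf
          rcases List.mem_append.mp hp with hp1 | hp2
          · obtain ⟨d, hd, rfl⟩ := List.mem_map.mp hp1
            exact pv_mem_getD_univ deps n d hd
          · rcases List.mem_cons.mp hp2 with rfl | hp3
            · simp at hpf
            · exact hinv p (List.mem_cons_of_mem _ hp3) hpf
        have hbound : ((deps.getD n []).map (fun d => (d, false)) ++ (n, true) :: S).length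
            + pvK deps (PySem.Set.add vo.1 n) * (2 + (deps.values.map List.length).sum) ≤ g := by
          rw [List.length_append, List.length_map, List.length_cons]
          rw [List.length_cons] at hb
          omega
        rw [ih (PySem.Set.add vo.1 n, vo.2) _ hinv' hbound]
        rw [pvSem_append]
        rw [pvSem_falses deps (deps.getD n []) (fun d hd => pv_mem_getD_univ deps n d hd)
          (PySem.Set.add vo.1 n, vo.2) (pvK deps vo.1) hklt]
        have hdfs : pvDfsA deps (pvK deps vo.1 + 1) vo n
            = (let r := (deps.getD n []).foldl (fun p d => pvDfsA deps (pvK deps vo.1) p d)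
                (PySem.Set.add vo.1 n, vo.2); (r.1, r.2 ++ [n])) := by
          simp only [pvDfsA]
          rw [if_neg hc]
        rw [hdfs]
        simp [pvSem]

-- the dependency dict built by A's insert-empty-then-append loops equals the one B builds
lemma pv_insert_insert (d : PySem.Dict String (List String)) (t : String) (v w : List String) :
    (d.insert t v).insert t w = d.insert t w := by
  apply PySem.Dict.ext
  by_cases hc : d.contains t = true
  · rw [PySem.Dict.items_insert_of_contains _ w (PySem.Dict.contains_insert_self d t v),
      PySem.Dict.items_insert_of_contains _ v hc,
      PySem.Dict.items_insert_of_contains _ w hc, List.map_map]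
    apply List.map_congr_left
    intro p _
    by_cases hp : (p.1 == t) = true <;> simp [Function.comp, hp]
  · have hc' : d.contains t = false := by simpa using hc
    rw [PySem.Dict.items_insert_of_contains _ w (PySem.Dict.contains_insert_self d t v),
      PySem.Dict.items_insert_of_not_contains _ v hc',
      PySem.Dict.items_insert_of_not_contains _ w hc', List.map_append]
    have hkeys : ∀ p ∈ d.items, (p.1 == t) = false := by
      intro p hp
      by_contra hbc
      have hpt : p.1 = t := by
        have : (p.1 == t) = true := by
          cases hbt : (p.1 == t) with
          | false => exact absurd hbt hbc
          | true => rfl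
        exact eq_of_beq this
      have hctr : d.contains t = true := (PySem.Dict.contains_iff_mem_keys d t).mpr (by
        simp only [PySem.Dict.keys]
        exact List.mem_map.mpr ⟨p, hp, hpt⟩)
      rw [hc'] at hctr
      exact absurd hctr (by simp)
    have hmap : List.map (fun p => if (p.1 == t) = true then (t, w) else p) d.items = d.items := by
      conv_rhs => rw [← List.map_id d.items]
      apply List.map_congr_left
      intro p hp
      simp [hkeys p hp]
    rw [hmap]
    simp

lemma pv_modify_fold (t : String) :
    ∀ (fks : List (List (String × String))) (d : PySem.Dict String (List String)) (acc : List String),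
      fks.foldl (fun dep fk => dep.modify t []
          (fun l => l ++ [(PySem.Dict.ofList fk).getD "references_table" ""])) (d.insert t acc)
      = d.insert t (acc ++ fks.map (fun fk => (PySem.Dict.ofList fk).getD "references_table" "")) := by
  intro fks
  induction fks with
  | nil => intro d acc; simp
  | cons fk rest ih =>
    intro d acc
    rw [List.foldl_cons]
    have h1 : (d.insert t acc).modify t []
        (fun l => l ++ [(PySem.Dict.ofList fk).getD "references_table" ""])
        = d.insert t (acc ++ [(PySem.Dict.ofList fk).getD "references_table" ""]) := by
      show (d.insert t acc).insert t ((d.insert t acc).getD t [] ++ _) = _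
      rw [PySem.Dict.getD_insert_self]
      exact pv_insert_insert d t acc _
    rw [h1, ih]
    simp

lemma pv_step_eq (dep : PySem.Dict String (List String))
    (ti : String × List (String × List (List (String × String)))) :
    (let dep' := dep.insert ti.1 ([] : List String)
     let info := PySem.Dict.ofList ti.2
     if info.contains "foreign_keys" then
       (info.getD "foreign_keys" []).foldl
         (fun dep fk => dep.modify ti.1 []
           (fun l => l ++ [(PySem.Dict.ofList fk).getD "references_table" ""])) dep'
     else dep')
    = dep.insert ti.1 (((PySem.Dict.ofList ti.2).getD "foreign_keys" []).map
        (fun fk => (PySem.Dict.ofList fk).getD "references_table" "")) := by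
  by_cases hc : (PySem.Dict.ofList ti.2).contains "foreign_keys" = true
  · simp only [hc, if_true]
    simpa using pv_modify_fold ti.1 ((PySem.Dict.ofList ti.2).getD "foreign_keys" []) dep []
  · have hc' : (PySem.Dict.ofList ti.2).contains "foreign_keys" = false := by simpa using hc
    simp only [hc', Bool.false_eq_true, if_false]
    rw [PySem.Dict.getD_of_not_contains _ _ hc']
    simp

lemma pv_deps_eq (items : List (String × List (String × List (List (String × String))))) :
    items.foldl (fun dep ti =>
      let dep' := dep.insert ti.1 ([] : List String)
      let info := PySem.Dict.ofList ti.2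
      if info.contains "foreign_keys" then
        (info.getD "foreign_keys" []).foldl
          (fun dep fk => dep.modify ti.1 []
            (fun l => l ++ [(PySem.Dict.ofList fk).getD "references_table" ""])) dep'
      else dep') PySem.Dict.empty
    = items.foldl (fun dep ti =>
        dep.insert ti.1 (((PySem.Dict.ofList ti.2).getD "foreign_keys" []).map
          (fun fk => (PySem.Dict.ofList fk).getD "references_table" ""))) PySem.Dict.empty :=
  PySem.List.foldl_congr_mem' _ _ _ _ (fun ti _ dep => pv_step_eq dep ti)

-- both top-level folds over the table names agree
def pvRunAtop (deps : PySem.Dict String (List String)) : List String :=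
  (deps.keys.foldl (fun vo t =>
    pvDfsA deps ((deps.keys ++ deps.values.flatten).length + 1) vo t)
    ((PySem.Set.empty : PySem.Set String), ([] : List String))).2

def pvRunBtop (deps : PySem.Dict String (List String)) : List String :=
  (deps.keys.foldl (fun vo t =>
    pvRunB deps (1 + (deps.keys ++ deps.values.flatten).length *
      (2 + (deps.values.map List.length).sum)) vo [(t, false)])
    ((PySem.Set.empty : PySem.Set String), ([] : List String))).2

lemma pv_top (deps : PySem.Dict String (List String)) : pvRunAtop deps = pvRunBtop deps := by
  unfold pvRunAtop pvRunBtop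
  refine congrArg Prod.snd (PySem.List.foldl_congr_mem' _ _ _ _ ?_)
  intro t ht vo
  have htu : t ∈ pvUniv deps := List.mem_append_left _ ht
  have hkle := pvK_le_len deps vo.1
  have hulen : (pvUniv deps).length = (deps.keys ++ deps.values.flatten).length := rfl
  have hrun : pvRunB deps (1 + (deps.keys ++ deps.values.flatten).length *
      (2 + (deps.values.map List.length).sum)) vo [(t, false)] = pvSem deps vo [(t, false)] := by
    refine pvRunB_eq_sem deps _ vo [(t, false)] ?_ ?_
    · intro p hp _
      have : p = (t, false) := List.mem_singleton.mp hp
      rw [this]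
      exact htu
    · rw [List.length_singleton]
      have hmul := Nat.mul_le_mul_right (2 + (deps.values.map List.length).sum)
        (le_of_le_of_eq hkle (by rw [hulen]))
      omega
  rw [hrun]
  show pvDfsA deps _ vo t = pvSem deps (pvDfsA deps (pvK deps vo.1 + 1) vo t) []
  have : pvSem deps (pvDfsA deps (pvK deps vo.1 + 1) vo t) [] = pvDfsA deps (pvK deps vo.1 + 1) vo t := by
    simp [pvSem]
  rw [this]
  exact pvDfsA_irrel deps _ _ vo t htu (by omega) (Nat.lt_succ_self _)

-- ===== VERDICT (by name: the statement is the Claim_ definition above) =====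
theorem get_ordered_tables_py_spec : Claim_equal_get_ordered_tables_py := by
  intro sc _ _
  unfold Spec_get_ordered_tables_py
  calc get_ordered_tables_py sc
      = pvRunAtop ((PySem.Dict.ofList sc).items.foldl (fun dep ti =>
          let dep' := dep.insert ti.1 ([] : List String)
          let info := PySem.Dict.ofList ti.2
          if info.contains "foreign_keys" then
            (info.getD "foreign_keys" []).foldl
              (fun dep fk => dep.modify ti.1 []
                (fun l => l ++ [(PySem.Dict.ofList fk).getD "references_table" ""])) dep'
          else dep') PySem.Dict.empty) := rfl
    _ = pvRunAtop ((PySem.Dict.ofList sc).items.foldl (fun dep ti =>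
          dep.insert ti.1 (((PySem.Dict.ofList ti.2).getD "foreign_keys" []).map
            (fun fk => (PySem.Dict.ofList fk).getD "references_table" ""))) PySem.Dict.empty) := by
          rw [pv_deps_eq]
    _ = pvRunBtop ((PySem.Dict.ofList sc).items.foldl (fun dep ti =>
          dep.insert ti.1 (((PySem.Dict.ofList ti.2).getD "foreign_keys" []).map
            (fun fk => (PySem.Dict.ofList fk).getD "references_table" ""))) PySem.Dict.empty) :=
          pv_top _
    _ = get_ordered_tables_py_alt sc := rfl
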